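-- pv_equiv track=rewrite | github.com/Sujai1/hybrid-discovery | Hybrid Discovery Code/Methods/Linear Topological Sort/LHTS_method.py | find_max_location
-- ===== SOURCE A (Python) =====
-- def is_y_ancestor_of_x_ancestors(A, x, y):
--     """
--     Check if node y is an ancestor of any of x's ancestors in the given table A.
--
--     :param A: 2D list representing the ancestor relationships (matrix)
--     :param x: Node whose ancestors to check against y
--     :param y: Node to check if it is an ancestor of any of x's ancestors
--     :return: True if y is an ancestor of any of x's ancestors, False otherwise
--     """
--     # check if y is direct parent of x
--     if A[y][x] == 2:
--         return True
--     n = len(A)  # Assuming A is a square matrix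
--     for i in range(n):
--         # Check if i is an ancestor of x
--         if A[i][x] == 2:
--             # Check if y is an ancestor of i
--             if A[y][i] == 2:
--                 return True
--     return False
--
-- def find_max_location(lists,ancestors):
--     """
--     Finds the location of the maximum value in a list of lists.
--
--     :param lists: A list of lists containing numerical values.
--     :return: A tuple (i, j) where i is the index of the sublist containing the max value,
--              and j is the index of the max value within that sublist.
--     """
--     if not lists:
--         return None  # Return None if the list of lists is empty
--
--     max_value = float('-inf')
--     max_location = (-1, -1)  # Initialize to an invalid index
--     for i, sublist in enumerate(lists):
--         for j, value in enumerate(sublist):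
--             if is_y_ancestor_of_x_ancestors(ancestors, i, j) == False:
--
--                 if value > max_value:
--                     max_value = value
--                     max_location = (i, j)
--
--
--     return max_location
-- ===== SOURCE B (Python) =====
-- def find_max_location(lists, ancestors):
--     """Same result as A, but the ancestor-of-ancestor test is precomputed:
--     parents[x] (the rows k with ancestors[k][x] == 2) is built once per column,
--     then each row i gets a boolean 'blocked' table, so every element lookup is O(1)."""
--     if not lists:
--         return None
--     n = len(ancestors)
--     parents = [[k for k in range(n) if ancestors[k][x] == 2] for x in range(n)]
--     best = None
--     loc = (-1, -1)
--     for i, sub in enumerate(lists):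
--         blocked = [False] * n
--         for k in parents[i]:
--             blocked[k] = True
--             for kk in parents[k]:
--                 blocked[kk] = True
--         for j, v in enumerate(sub):
--             if not blocked[j] and (best is None or v > best):
--                 best = v
--                 loc = (i, j)
--     return loc
-- ===== Notes on version B (the rewrite author's own statement) =====
-- stated objective: faster
-- what changed: Instead of re-scanning the whole ancestor matrix for every element (is_y_ancestor_of_x_ancestors per value), B precomputes the parent set of every column once and marks a per-row boolean 'blocked' table, so each element test is an O(1) lookup.
-- outside the precondition, e.g. on find_max_location([[5]], [[2, 2], [2]]): A returns (-1, -1), B raises IndexError; on find_max_location([[], []], [[0], [0, 0]]): A returns (-1, -1), B raises IndexError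
import Mathlib
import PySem

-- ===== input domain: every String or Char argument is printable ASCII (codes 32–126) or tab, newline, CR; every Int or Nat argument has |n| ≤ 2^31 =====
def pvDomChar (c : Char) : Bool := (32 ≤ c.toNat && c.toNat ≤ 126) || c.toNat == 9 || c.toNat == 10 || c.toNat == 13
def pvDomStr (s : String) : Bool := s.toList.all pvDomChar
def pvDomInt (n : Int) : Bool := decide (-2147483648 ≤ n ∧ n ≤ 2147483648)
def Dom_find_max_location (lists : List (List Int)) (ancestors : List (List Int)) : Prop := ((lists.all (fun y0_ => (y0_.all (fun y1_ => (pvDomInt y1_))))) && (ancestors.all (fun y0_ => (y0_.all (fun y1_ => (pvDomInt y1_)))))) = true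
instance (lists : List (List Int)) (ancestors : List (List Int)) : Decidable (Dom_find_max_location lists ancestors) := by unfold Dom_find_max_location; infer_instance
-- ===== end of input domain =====

-- B replaces A's per-element ancestor-matrix scan by a one-off parent-set precomputation
-- with a per-row boolean blocked table (objective: faster, measured in a timing run).


-- ===== PORT A =====
-- A[y][x] read with a default; exact wherever Python's indexing succeeds (Pre_ excludes the raises)
def pvA2 (A : List (List Int)) (y x : Int) : Int :=
  PySem.List.pyGetD (PySem.List.pyGetD A y []) x 0

-- transliteration of is_y_ancestor_of_x_ancestors (the loop's early return true = List.any)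
def is_y_ancestor_of_x_ancestors (A : List (List Int)) (x y : Int) : Bool :=
  if pvA2 A y x = 2 then true
  else (List.range A.length).any (fun i =>
    pvA2 A (i : Int) x = 2 && pvA2 A y (i : Int) = 2)

def find_max_location (lists : List (List Int)) (ancestors : List (List Int)) : Option (List Int) :=
  if lists = [] then none
  else
    let st := (PySem.List.enumerate lists 0).foldl (fun st p =>
      (PySem.List.enumerate p.2 0).foldl (fun st q =>
        if is_y_ancestor_of_x_ancestors ancestors p.1 q.1 = false then
          match st.1 with
          | none => ((some q.2, (p.1, q.1)) : Option Int × (Int × Int))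
          | some m => if q.2 > m then (some q.2, (p.1, q.1)) else st
        else st) st) ((none : Option Int), ((-1 : Int), (-1 : Int)))
    some [st.2.1, st.2.2]

-- ===== PORT B =====
-- parents[x] = [k for k in range(n) if ancestors[k][x] == 2]
def pvParents (A : List (List Int)) (n : Nat) : List (List Nat) :=
  (List.range n).map (fun x : Nat =>
    (List.range n).filter (fun k : Nat => pvA2 A (k : Int) (x : Int) = 2))

-- blocked = [False]*n; for k in parents[i]: blocked[k]=True; for kk in parents[k]: blocked[kk]=True
def pvBlockedRow (parents : List (List Nat)) (n i : Nat) : List Bool :=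
  (parents.getD i []).foldl (fun b k =>
    (parents.getD k []).foldl (fun b kk => b.set kk true) (b.set k true))
    (List.replicate n false)

def find_max_location_alt (lists : List (List Int)) (ancestors : List (List Int)) : Option (List Int) :=
  if lists = [] then none
  else
    let n := ancestors.length
    let parents := pvParents ancestors n
    let st := (PySem.List.enumerate lists 0).foldl (fun st p =>
      let blocked := pvBlockedRow parents n p.1.toNat
      (PySem.List.enumerate p.2 0).foldl (fun st q =>
        if !blocked.getD q.1.toNat false &&
           (match st.1 with | none => true | some m => q.2 > m) then
          ((some q.2, (p.1, q.1)) : Option Int × (Int × Int))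
        else st) st) ((none : Option Int), ((-1 : Int), (-1 : Int)))
    some [st.2.1, st.2.2]

-- ===== PRECONDITION & SPEC =====
-- Pre_ admits empty lists, or a square ancestor matrix large enough for every index the
-- scan may touch; it excludes the inputs where Python A raises IndexError, plus ragged or
-- undersized matrices on which A happens to return only because its scan never reaches the
-- missing entries (an accident of evaluation order; B raises IndexError there).
def Pre_find_max_location (lists : List (List Int)) (ancestors : List (List Int)) : Prop :=
  lists = [] ∨
  ((∀ row ∈ ancestors, row.length = ancestors.length) ∧
   lists.length ≤ ancestors.length ∧
   ∀ sub ∈ lists, sub.length ≤ ancestors.length)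
instance (lists : List (List Int)) (ancestors : List (List Int)) : Decidable (Pre_find_max_location lists ancestors) := by unfold Pre_find_max_location; infer_instance

def pvWitness_find_max_location : List (List Int) × List (List Int) :=
  ([[3, -1], [7]], [[0, 2], [0, 0]])

def Spec_find_max_location (lists : List (List Int)) (ancestors : List (List Int)) (out : Option (List Int)) : Prop := out = find_max_location_alt lists ancestors
instance (lists : List (List Int)) (ancestors : List (List Int)) (out : Option (List Int)) : Decidable (Spec_find_max_location lists ancestors out) := by unfold Spec_find_max_location; infer_instance

-- ===== CLAIM (what is proved, stated in full; the proofs are below) =====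
def Claim_equal_find_max_location : Prop := ∀ (lists : List (List Int)) (ancestors : List (List Int)), Dom_find_max_location lists ancestors → Pre_find_max_location lists ancestors → Spec_find_max_location lists ancestors (find_max_location lists ancestors)

-- ===== LEMMAS AND PROOFS =====

-- setting indices true preserves length
lemma pv_len_mark (l : List Nat) (b : List Bool) :
    (l.foldl (fun b kk => b.set kk true) b).length = b.length := by
  induction l generalizing b with
  | nil => rfl
  | cons k l ih => rw [List.foldl_cons, ih]; simp

lemma pv_len_blocked (parents : List (List Nat)) (l : List Nat) (b : List Bool) :
    (l.foldl (fun b k => (parents.getD k []).foldl (fun b kk => b.set kk true) (b.set k true)) b).length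
      = b.length := by
  induction l generalizing b with
  | nil => rfl
  | cons k l ih => rw [List.foldl_cons, ih, pv_len_mark]; simp

-- reading back an index after marking a list of indices true
lemma pv_mark_getD (l : List Nat) (b : List Bool) (j : Nat) (hj : j < b.length) :
    (l.foldl (fun b kk => b.set kk true) b).getD j false
      = (b.getD j false || l.contains j) := by
  induction l generalizing b with
  | nil => simp
  | cons k l ih =>
      rw [List.foldl_cons, ih _ (by simpa using hj)]
      by_cases hk : k = j
      · subst hk
        simp [List.getD, hj]
      · simp [List.getD, hk, Ne.symm hk]

-- the blocked table after the outer marking loop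
lemma pv_blocked_getD (parents : List (List Nat)) (l : List Nat) (b : List Bool) (j : Nat)
    (hj : j < b.length) :
    (l.foldl (fun b k => (parents.getD k []).foldl (fun b kk => b.set kk true) (b.set k true)) b).getD j false
      = (b.getD j false || l.any (fun k => j == k || (parents.getD k []).contains j)) := by
  induction l generalizing b with
  | nil => simp
  | cons k l ih =>
      rw [List.foldl_cons, ih _ (by simp [pv_len_mark, hj]),
        pv_mark_getD _ _ _ (by simpa using hj)]
      by_cases hk : k = j
      · subst hk
        simp [List.getD, hj, Bool.or_comm]
      · rw [List.any_cons, show (j == k) = false from by simp [Ne.symm hk], Bool.false_or]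
        simp [List.getD, hk, Bool.or_assoc]

-- pvParents read at an in-range column
lemma pv_parents_getD (A : List (List Int)) (x : Nat) (hx : x < A.length) :
    (pvParents A A.length).getD x []
      = (List.range A.length).filter (fun k : Nat => pvA2 A (k : Int) (x : Int) = 2) := by
  unfold pvParents
  exact PySem.List.getD_map_range _ _ _ _ hx

-- the precomputed blocked bit agrees with A's on-the-fly ancestor scan
lemma pv_blocked_eq (A : List (List Int)) (i j : Nat) (hi : i < A.length) :
    (pvBlockedRow (pvParents A A.length) A.length i).getD j false
      = is_y_ancestor_of_x_ancestors A (i : Int) (j : Int) := by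
  by_cases hj : j < A.length
  · unfold pvBlockedRow
    rw [pv_blocked_getD _ _ _ _ (by simpa using hj), pv_parents_getD A i hi]
    have hrep : (List.replicate A.length false).getD j false = false := by
      by_cases h : j < A.length <;> simp [List.getD, h]
    rw [hrep, Bool.false_or, Bool.eq_iff_iff]
    simp only [List.any_eq_true, List.mem_filter, List.mem_range, Bool.or_eq_true, beq_iff_eq,
      List.contains_iff_mem, decide_eq_true_eq]
    constructor
    · rintro ⟨k, ⟨hkn, hk2⟩, hk⟩
      unfold is_y_ancestor_of_x_ancestors
      rcases hk with rfl | hjk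
      · simp [hk2]
      · rw [pv_parents_getD A k hkn] at hjk
        simp only [List.mem_filter, List.mem_range, decide_eq_true_eq] at hjk
        split
        · rfl
        · rw [List.any_eq_true]
          exact ⟨k, by simp [hkn], by simp [hk2, hjk.2]⟩
    · intro h
      unfold is_y_ancestor_of_x_ancestors at h
      split at h
      · next hyi =>
          exact ⟨j, ⟨hj, hyi⟩, Or.inl rfl⟩
      · rw [List.any_eq_true] at h
        obtain ⟨k, hkr, hk⟩ := h
        rw [List.mem_range] at hkr
        simp only [Bool.and_eq_true, decide_eq_true_eq] at hk
        refine ⟨k, ⟨hkr, hk.1⟩, Or.inr ?_⟩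
        rw [pv_parents_getD A k hkr]
        simp [List.mem_filter, List.mem_range, hj, hk.2]
  · have hlen : (pvBlockedRow (pvParents A A.length) A.length i).length = A.length := by
      unfold pvBlockedRow; rw [pv_len_blocked]; simp
    rw [List.getD_eq_default _ _ (by omega)]
    have hA : A[j]? = (none : Option (List Int)) := by
      rw [List.getElem?_eq_none_iff]; omega
    have h0 : ∀ x : Nat, pvA2 A (j : Int) (x : Int) = 0 := by
      intro x; simp [pvA2, List.getD, hA]
    symm
    unfold is_y_ancestor_of_x_ancestors
    rw [if_neg (by simp [h0 i]), List.any_eq_false]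
    intro k _
    simp [h0 k]

-- ===== VERDICT (by name: the statement is the Claim_ definition above) =====
theorem find_max_location_spec : Claim_equal_find_max_location := by
  intro lists ancestors _ hpre
  show find_max_location lists ancestors = find_max_location_alt lists ancestors
  by_cases hne : lists = []
  · simp [find_max_location, find_max_location_alt, hne]
  · simp only [find_max_location, find_max_location_alt, if_neg hne]
    refine congrArg (fun st : Option Int × Int × Int => some [st.2.1, st.2.2]) ?_
    rcases hpre with hpre | ⟨hsq, hlen, hsub⟩
    · exact absurd hpre hne
    · apply PySem.List.foldl_congr_mem
      intro st p hp
      obtain ⟨k, hk, rfl⟩ := (PySem.List.mem_enumerate_iff _ _ _).mp hp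
      apply PySem.List.foldl_congr_mem
      intro st q hq
      obtain ⟨m, hm, rfl⟩ := (PySem.List.mem_enumerate_iff _ _ _).mp hq
      simp only [zero_add, Int.toNat_natCast]
      rw [pv_blocked_eq ancestors k m (lt_of_lt_of_le hk hlen)]
      rcases st with ⟨best, loc⟩
      cases hy : is_y_ancestor_of_x_ancestors ancestors (k : Int) (m : Int) <;>
        cases best <;> simp
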